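-- pv_equiv track=rewrite | github.com/qwerty-loops/CodePath | Week 2/TUE_SP_1_SET_1/prob10.py | num_VIP_guests
-- ===== SOURCE A (Python) =====
-- def num_VIP_guests(vip_passes, guests):
--     n=0
--     for i in guests:
--         if i in vip_passes:
--             n+=vip_passes.count(i)
--     return n
--
-- #OR
--
--     c=0
--     for i in guests:
--         if i in vip_passes:
--             c+=1
--     return c
--
-- #OR
--
--     c=0
--     set1=set(vip_passes)
--     for i in guests:
--         if i in set1:
--             c+=1
--     return c
--
-- #OR
--     vp={}
--     for i in guests:
--         if i not in vp:
--             vp[i]=1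
--         else:
--             vp[i]+=1
--
--     s=0
--     for i in vip_passes:
--         if i in vp.keys():
--             s+=vp[i]
--     return s
-- ===== SOURCE B (Python) =====
-- def num_VIP_guests(vip_passes, guests):
--     # Build frequency tables for both lists, then take their dot product
--     # over the distinct guest names.
--     gcnt = {}
--     for g in guests:
--         gcnt[g] = gcnt.get(g, 0) + 1
--     vcnt = {}
--     for v in vip_passes:
--         vcnt[v] = vcnt.get(v, 0) + 1
--     return sum(c * vcnt.get(k, 0) for k, c in gcnt.items())
-- ===== Notes on version B (the rewrite author's own statement) =====
-- stated objective: faster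
-- what changed: Replaces the per-guest membership-test plus vip_passes.count scan (quadratic) with two frequency tables built in one pass each and a dot product over the distinct guest names.
import Mathlib
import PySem

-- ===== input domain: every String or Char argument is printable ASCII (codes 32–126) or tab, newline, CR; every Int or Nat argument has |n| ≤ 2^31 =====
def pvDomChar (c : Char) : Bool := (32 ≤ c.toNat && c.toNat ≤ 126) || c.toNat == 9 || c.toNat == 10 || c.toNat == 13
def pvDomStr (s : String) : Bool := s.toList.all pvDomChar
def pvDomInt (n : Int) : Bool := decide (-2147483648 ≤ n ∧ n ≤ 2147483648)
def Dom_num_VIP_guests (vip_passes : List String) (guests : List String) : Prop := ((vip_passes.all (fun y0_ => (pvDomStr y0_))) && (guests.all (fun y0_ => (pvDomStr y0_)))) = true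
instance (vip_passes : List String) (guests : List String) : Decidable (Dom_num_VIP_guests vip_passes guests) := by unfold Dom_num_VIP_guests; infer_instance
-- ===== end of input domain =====

-- B replaces A's per-guest membership-test + .count scan by two one-pass
-- frequency tables and a dot product over the distinct guest names (faster in a timing run's measurement at the largest size).

-- ===== PORT A =====
def num_VIP_guests (vip_passes : List String) (guests : List String) : Int :=
  guests.foldl (fun n i =>
    if vip_passes.contains i then n + (PySem.List.count vip_passes i : Int) else n) 0

-- ===== PORT B =====
def num_VIP_guests_alt (vip_passes : List String) (guests : List String) : Int :=
  let gc := guests.foldl (fun d x => d.modify x 0 (· + 1)) (PySem.Dict.empty : PySem.Dict String Int)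
  let vc := vip_passes.foldl (fun d x => d.modify x 0 (· + 1)) (PySem.Dict.empty : PySem.Dict String Int)
  (gc.items.map (fun kv => kv.2 * vc.getD kv.1 0)).sum

-- ===== PRECONDITION & SPEC =====
def Spec_num_VIP_guests (vip_passes : List String) (guests : List String) (out : Int) : Prop := out = num_VIP_guests_alt vip_passes guests
instance (vip_passes : List String) (guests : List String) (out : Int) : Decidable (Spec_num_VIP_guests vip_passes guests out) := by unfold Spec_num_VIP_guests; infer_instance

-- ===== CLAIM (what is proved, stated in full; the proofs are below) =====
def Claim_equal_num_VIP_guests : Prop := ∀ (vip_passes : List String) (guests : List String), Dom_num_VIP_guests vip_passes guests → Spec_num_VIP_guests vip_passes guests (num_VIP_guests vip_passes guests)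

-- ===== LEMMAS AND PROOFS =====

-- Over a nodup list containing x, the single-hit if-sum collapses to f x.
theorem sum_if_single (f : String → Int) :
    ∀ (d : List String), d.Nodup → ∀ x, x ∈ d →
      (d.map (fun k => if k = x then f k else 0)).sum = f x := by
  intro d
  induction d with
  | nil => intro _ x hx; cases hx
  | cons a s ihs =>
    intro hnd x hx
    rcases List.mem_cons.mp hx with h | h
    · subst h
      have hz : ∀ k ∈ s, (if k = x then f k else 0) = 0 := by
        intro k hk
        have : k ≠ x := fun hh => (List.nodup_cons.mp hnd).1 (hh ▸ hk)
        simp [this]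
      rw [List.map_cons, List.sum_cons, List.sum_eq_zero (by simpa using hz)]
      simp
    · have hna : a ≠ x := fun hh => (List.nodup_cons.mp hnd).1 (hh ▸ h)
      rw [List.map_cons, List.sum_cons, ihs (List.nodup_cons.mp hnd).2 x h]
      simp [hna]

-- Sum of f over a list equals the count-weighted sum of f over any nodup list covering it.
theorem sum_map_eq_weighted (f : String → Int) :
    ∀ (l d : List String), d.Nodup → (∀ x ∈ l, x ∈ d) →
      (l.map f).sum = (d.map (fun k => (l.count k : Int) * f k)).sum := by
  intro l
  induction l with
  | nil => intro d _ _; simp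
  | cons x t ih =>
    intro d hnd hcov
    have hx : x ∈ d := hcov x (List.mem_cons_self)
    have hcov' : ∀ y ∈ t, y ∈ d := fun y hy => hcov y (List.mem_cons_of_mem _ hy)
    have hsplit : (d.map (fun k => ((x :: t).count k : Int) * f k)).sum
        = (d.map (fun k => (t.count k : Int) * f k)).sum
          + (d.map (fun k => if k = x then f k else 0)).sum := by
      rw [← List.sum_map_add]
      apply congrArg
      apply List.map_congr_left
      intro k _
      by_cases h : k = x
      · subst h; simp [List.count_cons_self]; ring
      · simp [List.count_cons_of_ne (by exact fun hh => h hh.symm), h]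
    rw [List.map_cons, List.sum_cons, ih d hnd hcov', hsplit,
      sum_if_single f d hnd x hx]
    ring

theorem numA_eq_sum (vp g : List String) :
    num_VIP_guests vp g = (g.map (fun i => (List.count i vp : Int))).sum := by
  unfold num_VIP_guests
  have hfun : (fun (n : Int) (i : String) =>
      if vp.contains i then n + (PySem.List.count vp i : Int) else n)
      = (fun n i => n + (List.count i vp : Int)) := by
    funext n i
    by_cases h : vp.contains i
    · simp only [h, if_true, PySem.List.count_eq]
    · have hz : List.count i vp = 0 := by
        rw [List.count_eq_zero]
        exact fun hm => h (List.contains_iff_mem.mpr hm)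
      simp [hz]
  rw [hfun, PySem.List.foldl_add (g := fun i => (List.count i vp : Int))]
  simp

theorem numB_eq_sum (vp g : List String) :
    num_VIP_guests_alt vp g
      = ((PySem.Set.ofList g).map (fun k => (List.count k g : Int) * (List.count k vp : Int))).sum := by
  simp only [num_VIP_guests_alt, ← PySem.Dict.counter_eq_foldl,
    PySem.Dict.items_counter, List.map_map]
  apply congrArg
  apply List.map_congr_left
  intro k _
  simp [PySem.Dict.getD_counter]

-- ===== VERDICT (by name: the statement is the Claim_ definition above) =====
theorem num_VIP_guests_spec : Claim_equal_num_VIP_guests := by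
  intro vp g _
  unfold Spec_num_VIP_guests
  rw [numA_eq_sum, numB_eq_sum,
    sum_map_eq_weighted (fun i => (List.count i vp : Int)) g (PySem.Set.ofList g)
      (PySem.Set.nodup_ofList g) (fun x hx => (PySem.Set.mem_ofList g x).mpr hx)]
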